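-- pv_equiv track=rewrite | github.com/andrew-kudrenko/python-test-tasks | task2.py | max_diff_pairs
-- ===== SOURCE A (Python) =====
-- def max_diff_pairs(string: str) -> int:
--   groups = []
--   pairs = 0
--   prev = None
--
--   for s in string:
--     if s != prev:
--       pairs += 1
--     else:
--       groups.append(pairs)
--       pairs = 0
--
--     prev = s
--
--   groups.append(pairs)
--
--   return max(groups)
-- ===== SOURCE B (Python) =====
-- def max_diff_pairs(string: str) -> int:
--     if not string:
--         return 0
--     markers = '1' + ''.join('1' if a != b else '0' for a, b in zip(string, string[1:]))
--     return max(len(run) for run in markers.split('0'))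
-- ===== Notes on version B (the rewrite author's own statement) =====
-- stated objective: alternative
-- what changed: Replaces A's single stateful reset-loop (running pair counter appended to a groups list) with a build-then-scan decomposition: construct a marker string of adjacent-inequality bits, split it on the equal-pair bits, and take the longest segment.
import Mathlib
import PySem

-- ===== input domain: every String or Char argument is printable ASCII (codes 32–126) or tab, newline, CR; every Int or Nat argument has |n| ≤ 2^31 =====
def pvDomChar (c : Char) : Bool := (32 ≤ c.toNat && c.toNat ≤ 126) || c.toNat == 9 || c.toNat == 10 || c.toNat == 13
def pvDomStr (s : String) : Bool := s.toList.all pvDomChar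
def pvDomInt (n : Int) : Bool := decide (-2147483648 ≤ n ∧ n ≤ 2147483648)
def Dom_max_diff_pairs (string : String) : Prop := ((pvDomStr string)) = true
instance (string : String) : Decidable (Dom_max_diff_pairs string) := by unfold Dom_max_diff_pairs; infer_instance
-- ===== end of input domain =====

-- B replaces A's stateful reset-loop with a build-then-scan decomposition (a marker
-- string of adjacent-inequality bits; answer = longest run of set bits); objective: alternative.

-- ===== PORT A =====
-- the for-loop of A: state (prev, pairs, groups), branches in source order
def loopA : List Char → Option Char → Int → List Int → List Int × Int
  | [], _, pairs, groups => (groups, pairs)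
  | s :: rest, prev, pairs, groups =>
    if some s ≠ prev then loopA rest (some s) (pairs + 1) groups
    else loopA rest (some s) 0 (groups ++ [pairs])

def max_diff_pairs (string : String) : Int :=
  let r := loopA string.toList none 0 []
  match r.1 ++ [r.2] with        -- groups.append(pairs); max(groups) — list never empty
  | [] => 0
  | x :: xs => xs.foldl max x

-- ===== PORT B =====
def max_diff_pairs_alt (string : String) : Int :=
  match string.toList with
  | [] => 0
  | c :: rest =>
    let markers : List Char :=
      '1' :: (List.zip (c :: rest) rest).map (fun ab => if ab.1 ≠ ab.2 then '1' else '0')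
    match (markers.splitOn '0').map (fun r => (r.length : Int)) with
    | [] => 0                    -- unreachable: splitOn never returns []
    | x :: xs => xs.foldl max x

-- ===== PRECONDITION & SPEC =====
def Spec_max_diff_pairs (string : String) (out : Int) : Prop := out = max_diff_pairs_alt string
instance (string : String) (out : Int) : Decidable (Spec_max_diff_pairs string out) := by unfold Spec_max_diff_pairs; infer_instance

-- ===== CLAIM (what is proved, stated in full; the proofs are below) =====
def Claim_equal_max_diff_pairs : Prop := ∀ (string : String), Dom_max_diff_pairs string → Spec_max_diff_pairs string (max_diff_pairs string)

-- ===== LEMMAS AND PROOFS =====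

-- adjacency bits as A's loop sees them: head of each cons is prev
def bitsF : Char → List Char → List Char
  | _, [] => []
  | p, c :: t => (if p ≠ c then '1' else '0') :: bitsF c t

theorem zip_map_eq_bitsF : ∀ (rest : List Char) (c : Char),
    (List.zip (c :: rest) rest).map (fun ab => if ab.1 ≠ ab.2 then '1' else '0') = bitsF c rest := by
  intro rest
  induction rest with
  | nil => intro c; rfl
  | cons d t ih =>
    intro c
    rw [List.zip_cons_cons, List.map_cons, ih]
    rfl

def lensOf (l : List (List Char)) : List Int := l.map (fun r => (r.length : Int))

theorem splitOn_bits_ne_nil (l : List Char) : l.splitOn '0' ≠ [] := by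
  simpa [List.splitOn] using List.splitOnP_ne_nil (fun x => x == '0') l

theorem loopA_split : ∀ (l : List Char) (p : Char) (pairs : Int) (groups : List Int)
    (s : List Char) (ss : List (List Char)),
    (bitsF p l).splitOn '0' = s :: ss →
    loopA l (some p) pairs groups =
      (groups ++ ((pairs + (s.length : Int)) :: lensOf ss).dropLast,
       ((pairs + (s.length : Int)) :: lensOf ss).getLastD 0) := by
  intro l
  induction l with
  | nil =>
    intro p pairs groups s ss h
    simp [bitsF, List.splitOn] at h
    obtain ⟨rfl, rfl⟩ := h
    simp [loopA, lensOf]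
  | cons c t ih =>
    intro p pairs groups s ss h
    by_cases hpc : p = c
    · -- equal pair: bit '0', A appends and resets
      subst hpc
      have hb : bitsF p (p :: t) = '0' :: bitsF p t := by simp [bitsF]
      rw [hb] at h
      obtain ⟨s', ss', h'⟩ : ∃ s' ss', (bitsF p t).splitOn '0' = s' :: ss' := by
        cases hsp : (bitsF p t).splitOn '0' with
        | nil => exact absurd hsp (splitOn_bits_ne_nil _)
        | cons a b => exact ⟨a, b, rfl⟩
      have h0 : ('0' :: bitsF p t).splitOn '0' = [] :: s' :: ss' := by
        simp [List.splitOn, List.splitOnP_cons] at h' ⊢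
        rw [h']
      rw [h0] at h
      obtain ⟨rfl, rfl⟩ := List.cons_eq_cons.mp h
      have hstep : loopA (p :: t) (some p) pairs groups = loopA t (some p) 0 (groups ++ [pairs]) := by
        simp [loopA]
      rw [hstep, ih p 0 (groups ++ [pairs]) s' ss' h']
      simp [lensOf]
    · -- unequal pair: bit '1', A extends the current count
      have hb : bitsF p (c :: t) = '1' :: bitsF c t := by simp [bitsF, hpc]
      obtain ⟨s', ss', h'⟩ : ∃ s' ss', (bitsF c t).splitOn '0' = s' :: ss' := by
        cases hsp : (bitsF c t).splitOn '0' with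
        | nil => exact absurd hsp (splitOn_bits_ne_nil _)
        | cons a b => exact ⟨a, b, rfl⟩
      rw [hb] at h
      have h1 : ('1' :: bitsF c t).splitOn '0' = ('1' :: s') :: ss' := by
        simp [List.splitOn, List.splitOnP_cons] at h' ⊢
        rw [h']
        rfl
      rw [h1] at h
      obtain ⟨rfl, rfl⟩ := by exact (List.cons_eq_cons.mp h)
      have := ih c (pairs + 1) groups s' ss' h'
      have hstep : loopA (c :: t) (some p) pairs groups = loopA t (some c) (pairs + 1) groups := by
        simp [loopA, Ne.symm hpc]
      rw [hstep, this]
      have harith : pairs + 1 + (s'.length : Int) = pairs + ((('1' :: s').length : Int)) := by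
        simp; ring
      rw [harith]
  
theorem dropLast_getLastD (x : Int) (xs : List Int) :
    (x :: xs).dropLast ++ [(x :: xs).getLastD 0] = x :: xs := by
  induction xs generalizing x with
  | nil => rfl
  | cons y ys ih => simpa using congrArg (x :: ·) (ih y)

-- ===== VERDICT (by name: the statement is the Claim_ definition above) =====
theorem max_diff_pairs_spec : Claim_equal_max_diff_pairs := by
  intro string _
  unfold Spec_max_diff_pairs max_diff_pairs max_diff_pairs_alt
  cases hl : string.toList with
  | nil => simp [loopA]
  | cons c rest =>
    obtain ⟨s, ss, hsp⟩ : ∃ s ss, (bitsF c rest).splitOn '0' = s :: ss := by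
      cases h : (bitsF c rest).splitOn '0' with
      | nil => exact absurd h (splitOn_bits_ne_nil _)
      | cons a b => exact ⟨a, b, rfl⟩
    have hstep : loopA (c :: rest) none 0 [] = loopA rest (some c) 1 [] := by
      simp [loopA]
    have hA := loopA_split rest c 1 [] s ss hsp
    have hm : (('1' :: bitsF c rest).splitOn '0') = ('1' :: s) :: ss := by
      simp [List.splitOn, List.splitOnP_cons] at hsp ⊢
      rw [hsp]; rfl
    simp only [hstep, hA, zip_map_eq_bitsF, hm]
    rw [List.nil_append, dropLast_getLastD]
    simp [lensOf]
    have : (1 : Int) + (s.length : Int) = (s.length : Int) + 1 := by ring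
    rw [this]
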